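-- pv_equiv track=rewrite | github.com/cry999/AtCoder | grand/031/A.py | colorful_subsequence
-- ===== SOURCE A (Python) =====
-- def colorful_subsequence(N: int, S: str)->int:
--     MOD = (10 ** 9) + 7
--     cum = {}
--     for c in S:
--         cum.setdefault(c, 0)
--         cum[c] += 1
--
--     values = list(cum.values())
--     count = 0
--     for i, v in enumerate(values):
--         temp = v
--         for v in values[i+1:]:
--             temp = (temp * (1 + v)) % MOD
--         count = (count + temp) % MOD
--
--     return count
-- ===== SOURCE B (Python) =====
-- def colorful_subsequence(N: int, S: str) -> int:
--     MOD = (10 ** 9) + 7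
--     cnt = {}
--     for c in S:
--         cnt[c] = cnt.get(c, 0) + 1
--     prod = 1
--     for v in cnt.values():
--         prod = (prod * (1 + v)) % MOD
--     return (prod - 1) % MOD
-- ===== Notes on version B (the rewrite author's own statement) =====
-- stated objective: simpler
-- what changed: Replaces A's quadratic nested loop over the character counts (which recomputes a suffix product for every index) by the closed form it telescopes to: one linear pass computing prod(1+count) mod 1e9+7, returning (prod-1) mod.
import Mathlib
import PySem

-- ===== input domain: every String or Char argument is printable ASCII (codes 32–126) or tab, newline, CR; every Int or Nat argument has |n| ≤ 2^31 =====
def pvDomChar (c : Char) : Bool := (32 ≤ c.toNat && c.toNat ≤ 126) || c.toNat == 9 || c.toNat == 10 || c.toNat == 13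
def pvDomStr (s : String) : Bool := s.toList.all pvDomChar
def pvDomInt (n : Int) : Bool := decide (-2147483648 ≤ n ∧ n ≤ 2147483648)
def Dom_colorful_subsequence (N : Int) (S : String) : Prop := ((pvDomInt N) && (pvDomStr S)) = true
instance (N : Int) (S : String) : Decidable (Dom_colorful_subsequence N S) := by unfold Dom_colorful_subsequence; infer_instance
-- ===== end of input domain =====

-- B replaces A's nested accumulation over the per-character counts by the single
-- product pass prod = ∏(1+v) mod, returning (prod-1) mod (objective: simpler).

-- ===== PORT A =====
def colorful_subsequence (N : Int) (S : String) : Int :=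
  let MOD : Int := 10 ^ 9 + 7
  let cum : PySem.Dict Char Int :=
    S.toList.foldl (fun cum c => (cum.setdefault c 0).modify c 0 (· + 1)) PySem.Dict.empty
  let values := cum.values
  let count :=
    (PySem.List.enumerate values 0).foldl (fun count iv =>
      let temp := (PySem.List.slice values (some (iv.1 + 1)) none).foldl
        (fun temp v => PySem.Int.mod (temp * (1 + v)) MOD) iv.2
      PySem.Int.mod (count + temp) MOD) 0
  count

-- ===== PORT B =====
def colorful_subsequence_alt (N : Int) (S : String) : Int :=
  let MOD : Int := 10 ^ 9 + 7
  let cnt : PySem.Dict Char Int :=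
    S.toList.foldl (fun cnt c => cnt.insert c (cnt.getD c 0 + 1)) PySem.Dict.empty
  let prod := cnt.values.foldl (fun prod v => PySem.Int.mod (prod * (1 + v)) MOD) 1
  PySem.Int.mod (prod - 1) MOD

-- ===== PRECONDITION & SPEC =====
def Spec_colorful_subsequence (N : Int) (S : String) (out : Int) : Prop := out = colorful_subsequence_alt N S
instance (N : Int) (S : String) (out : Int) : Decidable (Spec_colorful_subsequence N S out) := by unfold Spec_colorful_subsequence; infer_instance

-- ===== CLAIM (what is proved, stated in full; the proofs are below) =====
def Claim_equal_colorful_subsequence : Prop := ∀ (N : Int) (S : String), Dom_colorful_subsequence N S → Spec_colorful_subsequence N S (colorful_subsequence N S)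

-- ===== LEMMAS AND PROOFS =====

-- the modulus
def pvM : Int := 10 ^ 9 + 7

-- the exact (unreduced) product ∏ (1+v)
def pvP (vs : List Int) : Int := (vs.map (fun v => 1 + v)).prod

-- the reduced product loop shared by A's inner loop and B's product loop
def pvRed (vs : List Int) (t : Int) : Int :=
  vs.foldl (fun temp v => PySem.Int.mod (temp * (1 + v)) pvM) t

theorem pvM_pos : (0 : Int) < pvM := by decide

-- A's counter step equals B's counter step
theorem pv_step_eq (d : PySem.Dict Char Int) (c : Char) :
    (d.setdefault c 0).modify c 0 (· + 1) = d.insert c (d.getD c 0 + 1) := by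
  by_cases h : d.contains c = true
  · rw [PySem.Dict.setdefault_of_contains d 0 h]; rfl
  · have h' : d.contains c = false := by simpa using h
    rw [PySem.Dict.setdefault_of_not_contains d 0 h']
    show (d.insert c 0).insert c ((d.insert c 0).getD c 0 + 1) = _
    rw [PySem.Dict.insert_insert_self, PySem.Dict.getD_insert_self,
        PySem.Dict.getD_of_not_contains d 0 h']

theorem pv_dict_eq (l : List Char) :
    l.foldl (fun cum c => (cum.setdefault c 0).modify c 0 (· + 1)) (PySem.Dict.empty : PySem.Dict Char Int)
      = l.foldl (fun cnt c => cnt.insert c (cnt.getD c 0 + 1)) PySem.Dict.empty := by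
  have h : (fun (cum : PySem.Dict Char Int) c => (cum.setdefault c 0).modify c 0 (· + 1))
      = fun cnt c => cnt.insert c (cnt.getD c 0 + 1) := by
    funext d c; exact pv_step_eq d c
  rw [h]

-- the reduced product is congruent to the exact product
theorem pv_red_modeq (vs : List Int) : ∀ t : Int, pvRed vs t % pvM = (t * pvP vs) % pvM := by
  induction vs with
  | nil => intro t; simp [pvRed, pvP]
  | cons v tl ih =>
    intro t
    show pvRed tl (PySem.Int.mod (t * (1 + v)) pvM) % pvM = _
    rw [PySem.Int.mod_eq_emod_of_pos pvM_pos, ih]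
    rw [Int.mul_emod, Int.emod_emod_of_dvd _ dvd_rfl, ← Int.mul_emod]
    have : t * (1 + v) * pvP tl = t * pvP (v :: tl) := by
      simp [pvP]; ring
    rw [this]

-- A's outer loop computes (c + ∏(1+v) − 1) mod, for the suffix being processed
theorem pv_outer (all : List Int) (vs : List Int) :
    ∀ (k : Nat) (c : Int), all.drop k = vs → 0 ≤ c → c < pvM →
    (PySem.List.enumerate vs ((k : Int))).foldl (fun count iv =>
        PySem.Int.mod (count + (PySem.List.slice all (some (iv.1 + 1)) none).foldl
          (fun temp v => PySem.Int.mod (temp * (1 + v)) pvM) iv.2) pvM) c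
      = (c + pvP vs - 1) % pvM := by
  induction vs with
  | nil =>
    intro k c _ hc0 hc1
    simp only [PySem.List.enumerate_nil, List.foldl_nil, pvP, List.map_nil, List.prod_nil]
    rw [show c + 1 - 1 = c from by ring, Int.emod_eq_of_lt hc0 hc1]
  | cons v tl ih =>
    intro k c hdrop hc0 hc1
    rw [PySem.List.enumerate_cons]
    simp only [List.foldl_cons]
    have hdrop' : all.drop (k + 1) = tl := by
      have h := congrArg List.tail hdrop
      rw [List.tail_drop] at h
      exact h
    have hslice : PySem.List.slice all (some (((k : Int)) + 1)) none = tl := by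
      have hcast : ((k : Int)) + 1 = (((k + 1 : Nat) : Int)) := by push_cast; ring
      rw [hcast, PySem.List.slice_from_natCast, hdrop']
    rw [hslice]
    set c' := PySem.Int.mod (c + tl.foldl (fun temp v => PySem.Int.mod (temp * (1 + v)) pvM) v) pvM with hc'
    have hred : tl.foldl (fun temp v => PySem.Int.mod (temp * (1 + v)) pvM) v = pvRed tl v := rfl
    have hc'e : c' = (c + pvRed tl v) % pvM := by
      rw [hc', hred, PySem.Int.mod_eq_emod_of_pos pvM_pos]
    have h0 : 0 ≤ c' := by rw [hc'e]; exact Int.emod_nonneg _ (by decide)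
    have h1 : c' < pvM := by rw [hc'e]; exact Int.emod_lt_of_pos _ pvM_pos
    have hcast1 : ((k : Int)) + 1 = (((k + 1 : Nat) : Int)) := by push_cast; ring
    rw [hcast1]
    rw [ih (k + 1) c' hdrop' h0 h1]
    have h2 : c' % pvM = (c + v * pvP tl) % pvM := by
      rw [hc'e, Int.emod_emod_of_dvd _ dvd_rfl, Int.add_emod, pv_red_modeq, ← Int.add_emod]
    have h3 : (c' + (pvP tl - 1)) % pvM = ((c + v * pvP tl) + (pvP tl - 1)) % pvM := by
      rw [Int.add_emod, h2, ← Int.add_emod]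
    calc (c' + pvP tl - 1) % pvM
        = (c' + (pvP tl - 1)) % pvM := by ring_nf
      _ = ((c + v * pvP tl) + (pvP tl - 1)) % pvM := h3
      _ = (c + pvP (v :: tl) - 1) % pvM := by
          congr 1
          simp only [pvP, List.map_cons, List.prod_cons]
          ring

-- ===== VERDICT (by name: the statement is the Claim_ definition above) =====
theorem colorful_subsequence_spec : Claim_equal_colorful_subsequence := by
  unfold Claim_equal_colorful_subsequence Spec_colorful_subsequence
  intro N S _
  simp only [colorful_subsequence, colorful_subsequence_alt]
  rw [pv_dict_eq]
  rw [show ((10:Int) ^ 9 + 7) = pvM from rfl]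
  set vs := (S.toList.foldl (fun cnt c => cnt.insert c (cnt.getD c 0 + 1))
      (PySem.Dict.empty : PySem.Dict Char Int)).values with hvs
  have houter := pv_outer vs vs 0 0 (by simp) le_rfl pvM_pos
  rw [show (((0 : Nat) : Int)) = (0 : Int) from by norm_num] at houter
  rw [houter]
  show _ = PySem.Int.mod (pvRed vs 1 - 1) pvM
  rw [PySem.Int.mod_eq_emod_of_pos pvM_pos,
      Int.sub_emod (pvRed vs 1), pv_red_modeq, one_mul, ← Int.sub_emod]
  congr 1
  ring
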